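-- pv_equiv track=rewrite | github.com/lely475/CTPLab_SemiCOL2023 | src/utils/utils.py | create_input_output_mapping
-- ===== SOURCE A (Python) =====
-- def create_input_output_mapping(depth: int = 5, max_enc_dim: int = 200) -> int:
--     input_dims = []
--     output_dims = []
--     for encoded_dim in range(5, max_enc_dim):
--         input_dim = encoded_dim + 4
--         output_dim = encoded_dim
--         for _ in range(depth - 1):
--             input_dim = (input_dim * 2) + 4
--             output_dim = (output_dim * 2) - 4
--         input_dims.append(input_dim)
--         output_dims.append(output_dim)
--     return input_dims, output_dims
-- ===== SOURCE B (Python) =====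
-- def create_input_output_mapping(depth: int = 5, max_enc_dim: int = 200) -> int:
--     # closed form of the iterated affine map: after k doublings,
--     # input = (e+4)*2^k + 4*(2^k-1), output = e*2^k - 4*(2^k-1)
--     p = 1 << max(depth - 1, 0)
--     c = 4 * (p - 1)
--     dims = range(5, max_enc_dim)
--     return [(e + 4) * p + c for e in dims], [e * p - c for e in dims]
-- ===== Notes on version B (the rewrite author's own statement) =====
-- stated objective: faster
-- what changed: Replaced the inner depth-1 doubling loop by the closed form of the iterated affine map (p = 2^max(depth-1,0), input = (e+4)*p + 4*(p-1), output = e*p - 4*(p-1)), computed once and applied via comprehensions.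
import Mathlib
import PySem

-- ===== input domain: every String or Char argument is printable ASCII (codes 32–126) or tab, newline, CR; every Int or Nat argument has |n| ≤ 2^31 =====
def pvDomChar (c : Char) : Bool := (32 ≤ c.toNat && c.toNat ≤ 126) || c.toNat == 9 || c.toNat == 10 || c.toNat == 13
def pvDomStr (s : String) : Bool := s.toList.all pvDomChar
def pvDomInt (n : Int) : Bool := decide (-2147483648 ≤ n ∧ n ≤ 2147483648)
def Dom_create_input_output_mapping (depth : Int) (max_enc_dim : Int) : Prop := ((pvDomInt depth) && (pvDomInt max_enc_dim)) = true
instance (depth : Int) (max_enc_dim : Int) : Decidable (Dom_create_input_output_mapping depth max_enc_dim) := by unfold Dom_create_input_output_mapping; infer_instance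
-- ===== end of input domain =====

-- B replaces A's inner depth-1 doubling loop by the closed form of the iterated affine map (objective: faster, asymptotic).

-- ===== PORT A =====
def create_input_output_mapping (depth : Int) (max_enc_dim : Int) : List Int × List Int :=
  (PySem.List.pyRange 5 max_enc_dim 1).foldl
    (fun (acc : List Int × List Int) encoded_dim =>
      let io := (PySem.List.pyRange 0 (depth - 1) 1).foldl
        (fun (p : Int × Int) _ => (p.1 * 2 + 4, p.2 * 2 - 4)) (encoded_dim + 4, encoded_dim)
      (acc.1 ++ [io.1], acc.2 ++ [io.2]))
    ([], [])

-- ===== PORT B =====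
def create_input_output_mapping_alt (depth : Int) (max_enc_dim : Int) : List Int × List Int :=
  let p : Int := 2 ^ (depth - 1).toNat          -- 1 << max(depth-1, 0)
  let c : Int := 4 * (p - 1)
  let dims := PySem.List.pyRange 5 max_enc_dim 1
  (dims.map (fun e => (e + 4) * p + c), dims.map (fun e => e * p - c))

-- ===== PRECONDITION & SPEC =====
def Spec_create_input_output_mapping (depth : Int) (max_enc_dim : Int) (out : List Int × List Int) : Prop := out = create_input_output_mapping_alt depth max_enc_dim
instance (depth : Int) (max_enc_dim : Int) (out : List Int × List Int) : Decidable (Spec_create_input_output_mapping depth max_enc_dim out) := by unfold Spec_create_input_output_mapping; infer_instance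

-- ===== CLAIM (what is proved, stated in full; the proofs are below) =====
def Claim_equal_create_input_output_mapping : Prop := ∀ (depth : Int) (max_enc_dim : Int), Dom_create_input_output_mapping depth max_enc_dim → Spec_create_input_output_mapping depth max_enc_dim (create_input_output_mapping depth max_enc_dim)

-- ===== LEMMAS AND PROOFS =====

-- the inner doubling loop has the stated closed form (n = number of iterations)
theorem pv_inner_closed (l : List Int) (i o : Int) :
    l.foldl (fun (p : Int × Int) _ => (p.1 * 2 + 4, p.2 * 2 - 4)) (i, o)
      = (i * 2 ^ l.length + 4 * (2 ^ l.length - 1), o * 2 ^ l.length - 4 * (2 ^ l.length - 1)) := by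
  induction l generalizing i o with
  | nil => simp
  | cons x xs ih =>
    simp only [List.foldl_cons, ih, List.length_cons]
    refine Prod.ext ?_ ?_ <;> simp <;> ring

-- the outer accumulation of two lists is the pair of maps
theorem pv_outer_map (xs : List Int) (f g : Int → Int) (l₁ l₂ : List Int) :
    xs.foldl (fun (acc : List Int × List Int) e => (acc.1 ++ [f e], acc.2 ++ [g e])) (l₁, l₂)
      = (l₁ ++ xs.map f, l₂ ++ xs.map g) := by
  induction xs generalizing l₁ l₂ with
  | nil => simp
  | cons x xs ih => simp [ih]

-- ===== VERDICT (by name: the statement is the Claim_ definition above) =====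
theorem create_input_output_mapping_spec : Claim_equal_create_input_output_mapping := by
  intro depth max_enc_dim _
  unfold Spec_create_input_output_mapping create_input_output_mapping create_input_output_mapping_alt
  have hlen : (PySem.List.pyRange 0 (depth - 1) 1).length = (depth - 1).toNat :=
    by simp [PySem.List.length_pyRange_one]
  have : ∀ e : Int,
      (PySem.List.pyRange 0 (depth - 1) 1).foldl
        (fun (p : Int × Int) _ => (p.1 * 2 + 4, p.2 * 2 - 4)) (e + 4, e)
      = ((e + 4) * 2 ^ (depth - 1).toNat + 4 * (2 ^ (depth - 1).toNat - 1),
         e * 2 ^ (depth - 1).toNat - 4 * (2 ^ (depth - 1).toNat - 1)) := by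
    intro e
    rw [pv_inner_closed, hlen]
  simp only [this]
  simpa using pv_outer_map (PySem.List.pyRange 5 max_enc_dim 1)
    (fun e => (e + 4) * 2 ^ (depth - 1).toNat + 4 * (2 ^ (depth - 1).toNat - 1))
    (fun e => e * 2 ^ (depth - 1).toNat - 4 * (2 ^ (depth - 1).toNat - 1)) [] []
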